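-- pv_equiv track=rewrite | github.com/TheArcus02/Python-Assignments | matrix_transform.py | make_operations
-- ===== SOURCE A (Python) =====
-- def make_operations(matrix: list[list[int]], operations: list):
--     for operation in operations:
--         op_split = operation.split(' ')
--         if op_split[0] == 'T':
--             matrix = transpose(matrix)
--         elif op_split[0] == 'RR':
--             row = int(op_split[1])
--             matrix = reverse_row(matrix, row)
--         elif op_split[0] == 'RC':
--             col = int(op_split[1])
--             matrix = reverse_col(matrix, col)
--
--     return matrix
--
-- def reverse_row(matrix: list[list[int]], row: int):
--     matrix[row] = matrix[row][::-1]
--     return matrix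
--
-- def reverse_col(matrix: list[list[int]], col: int):
--     matrix_col = []
--     for row in matrix:
--         matrix_col.append(row[col])
--     matrix_col = matrix_col[::-1]
--
--     for i in range(len(matrix_col)):
--         matrix[i][col] = matrix_col[i]
--
--     return matrix
--
-- def transpose(matrix: list[list[int]]):
--     rows_count = len(matrix)
--     cols_count = len(matrix[0])
--     new_matrix = []
--     for col in range(cols_count):
--         new_row = []
--         for row in range(rows_count):
--             new_row.append(matrix[row][col])
--
--         new_matrix.append(new_row)
--     return new_matrix
-- ===== SOURCE B (Python) =====
-- def make_operations(matrix: list[list[int]], operations: list):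
--     # Lazy transpose: keep a flag instead of materialising each transpose;
--     # reversals are applied immediately to the corresponding axis of the
--     # stored grid, and at most one real transpose happens at the end.
--     # (A mutates `matrix` in place; B works on a copy — equivalence is about
--     # the return value.)
--     grid = [row[:] for row in matrix]
--     flipped = False
--     for operation in operations:
--         parts = operation.split(' ')
--         head = parts[0]
--         if head == 'T':
--             flipped = not flipped
--         elif head == 'RR' or head == 'RC':
--             idx = int(parts[1])
--             if (head == 'RR') != flipped:
--                 # reverse a physical row of the grid
--                 grid[idx] = grid[idx][::-1]
--             else:
--                 # reverse a physical column of the grid, in place, two pointers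
--                 n = len(grid)
--                 for i in range(n // 2):
--                     k = n - 1 - i
--                     grid[i][idx], grid[k][idx] = grid[k][idx], grid[i][idx]
--     if flipped:
--         return [list(col) for col in zip(*grid)]
--     return grid
-- ===== Notes on version B (the rewrite author's own statement) =====
-- stated objective: alternative
-- what changed: B never materialises a transpose per 'T' operation: it keeps a lazy transpose flag, applies each reversal directly to the matching axis of the stored grid (row slice-reverse or an in-place two-pointer column swap instead of A's extract-reverse-writeback), and performs at most one real transpose (via zip) at the end.
-- outside the precondition, e.g. on make_operations([[1], [2, 9]], ['T', 'T']): A returns [[1], [2]], B returns [[1], [2, 9]]; on make_operations([[], []], ['T']): A returns [], B returns []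
import Mathlib
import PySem

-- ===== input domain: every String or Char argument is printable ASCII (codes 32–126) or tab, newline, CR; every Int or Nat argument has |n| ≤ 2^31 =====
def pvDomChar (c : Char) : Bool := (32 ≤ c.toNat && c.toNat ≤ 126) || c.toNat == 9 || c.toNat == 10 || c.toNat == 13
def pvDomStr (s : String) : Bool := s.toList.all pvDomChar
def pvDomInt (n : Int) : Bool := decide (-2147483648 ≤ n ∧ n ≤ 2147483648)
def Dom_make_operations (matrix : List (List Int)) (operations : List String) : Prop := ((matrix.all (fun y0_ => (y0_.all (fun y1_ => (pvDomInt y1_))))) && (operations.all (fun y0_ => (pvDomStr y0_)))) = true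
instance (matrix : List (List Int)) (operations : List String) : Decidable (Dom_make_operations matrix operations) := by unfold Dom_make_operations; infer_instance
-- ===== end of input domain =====

-- B re-implements A with a lazy transpose flag (reversals hit the stored grid's
-- matching axis at once, a single final transpose); equivalence is about the
-- RETURN value only — A mutates `matrix` in place, B works on a copy.

-- shared tokenisation helper: operation.split(' ')  (sep ≠ "" so split? never fails)
def pvTok (op : String) : List String := (PySem.Str.split? op " ").getD []

-- ===== PORT A =====
def pvTranspose (m : List (List Int)) : List (List Int) :=
  let rows_count : Int := (m.length : Int)
  let cols_count : Int := ((PySem.List.pyGetD m 0 []).length : Int)  -- len(matrix[0]); m = [] raises in Python, excluded by Pre_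
  (PySem.List.pyRange 0 cols_count 1).foldl (fun new_matrix col =>
    new_matrix ++ [(PySem.List.pyRange 0 rows_count 1).foldl
      (fun new_row row => new_row ++ [PySem.List.pyGetD (PySem.List.pyGetD m row []) col 0]) []]) []

def pvReverseRow (m : List (List Int)) (row : Int) : List (List Int) :=
  -- matrix[row] = matrix[row][::-1]  (slice [::-1] is reverse, PySem.List.slice?_none_none_neg_one)
  PySem.List.pySetD m row (PySem.List.pyGetD m row []).reverse

def pvReverseCol (m : List (List Int)) (col : Int) : List (List Int) :=
  let matrix_col : List Int := m.foldl (fun acc row => acc ++ [PySem.List.pyGetD row col 0]) []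
  let matrix_col := matrix_col.reverse
  (PySem.List.pyRange 0 (matrix_col.length : Int) 1).foldl
    (fun mm i => PySem.List.pySetD mm i
      (PySem.List.pySetD (PySem.List.pyGetD mm i []) col (PySem.List.pyGetD matrix_col i 0))) m

def make_operations (matrix : List (List Int)) (operations : List String) : List (List Int) :=
  operations.foldl (fun m operation =>
    let op_split := pvTok operation
    if PySem.List.pyGetD op_split 0 "" = "T" then pvTranspose m
    else if PySem.List.pyGetD op_split 0 "" = "RR" then
      pvReverseRow m ((PySem.Int.ofStr? (PySem.List.pyGetD op_split 1 "")).getD 0)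
    else if PySem.List.pyGetD op_split 0 "" = "RC" then
      pvReverseCol m ((PySem.Int.ofStr? (PySem.List.pyGetD op_split 1 "")).getD 0)
    else m) matrix

-- ===== PORT B =====
-- hand port of zip(*grid), exact: rows of the zip are the columns, until some row
-- (or the grid) runs out; the first row's length bounds the number of zip steps.
def pvZipTGo : Nat → List (List Int) → List (List Int)
  | 0, _ => []
  | fuel + 1, m =>
    if m = [] || m.any List.isEmpty then []
    else (m.map (fun r => r.headD 0)) :: pvZipTGo fuel (m.map List.tail)

def pvZipT (m : List (List Int)) : List (List Int) := pvZipTGo (m.headD []).length m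

def pvSwapCol (g : List (List Int)) (idx : Int) : List (List Int) :=
  let n : Int := (g.length : Int)
  (PySem.List.pyRange 0 (PySem.Int.floordiv n 2) 1).foldl (fun g i =>
    let k : Int := n - 1 - i
    -- grid[i][idx], grid[k][idx] = grid[k][idx], grid[i][idx]
    let vi := PySem.List.pyGetD (PySem.List.pyGetD g i []) idx 0
    let vk := PySem.List.pyGetD (PySem.List.pyGetD g k []) idx 0
    let g1 := PySem.List.pySetD g i (PySem.List.pySetD (PySem.List.pyGetD g i []) idx vk)
    PySem.List.pySetD g1 k (PySem.List.pySetD (PySem.List.pyGetD g1 k []) idx vi)) g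

def make_operations_alt (matrix : List (List Int)) (operations : List String) : List (List Int) :=
  -- grid = [row[:] for row in matrix] : a pure-value copy is the identity here
  let st := operations.foldl (fun (st : List (List Int) × Bool) operation =>
    let parts := pvTok operation
    let head := PySem.List.pyGetD parts 0 ""
    if head = "T" then (st.1, !st.2)
    else if head = "RR" ∨ head = "RC" then
      let idx := (PySem.Int.ofStr? (PySem.List.pyGetD parts 1 "")).getD 0
      if ((head == "RR") != st.2) = true then
        (PySem.List.pySetD st.1 idx (PySem.List.pyGetD st.1 idx []).reverse, st.2)
      else
        (pvSwapCol st.1 idx, st.2)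
    else st) (matrix, false)
  if st.2 then pvZipT st.1 else st.1

-- ===== PRECONDITION & SPEC =====
def pvHead (op : String) : String := PySem.List.pyGetD (pvTok op) 0 ""
def pvIdx? (op : String) : Option Int :=
  match (pvTok op)[1]? with
  | none => none
  | some s => PySem.Int.ofStr? s
def pvWithin (o : Option Int) (n : Int) : Bool :=
  match o with
  | none => false
  | some i => decide (-n ≤ i ∧ i < n)

-- Pre_ excludes exactly the inputs where A raises (missing/unparsable/out-of-range
-- indices, transpose of an empty matrix or of one with a row shorter than its first)
-- and, when a 'T' operation occurs, matrices that are not nonempty rectangular: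
-- transposing a ragged or zero-width matrix is unspecified (A silently truncates
-- rows to the first row's length, B to the shortest row).
def Pre_make_operations (matrix : List (List Int)) (operations : List String) : Prop :=
  if operations.any (fun op => pvHead op == "T") then
    1 ≤ matrix.length ∧ 1 ≤ (matrix.headD []).length ∧
    (∀ row ∈ matrix, row.length = (matrix.headD []).length) ∧
    (∀ k, (hk : k < operations.length) →
      ((if ((operations.take k).countP (fun op => pvHead op == "T")) % 2 = 0 then
          (pvHead operations[k] = "RR" → pvWithin (pvIdx? operations[k]) (matrix.length : Int) = true) ∧
          (pvHead operations[k] = "RC" → pvWithin (pvIdx? operations[k]) ((matrix.headD []).length : Int))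
        else
          (pvHead operations[k] = "RR" → pvWithin (pvIdx? operations[k]) ((matrix.headD []).length : Int)) ∧
          (pvHead operations[k] = "RC" → pvWithin (pvIdx? operations[k]) (matrix.length : Int) = true))))
  else
    ∀ op ∈ operations,
      (pvHead op = "RR" → pvWithin (pvIdx? op) (matrix.length : Int) = true) ∧
      (pvHead op = "RC" → (pvIdx? op).isSome = true ∧
        ∀ row ∈ matrix, pvWithin (pvIdx? op) (row.length : Int) = true)

instance (matrix : List (List Int)) (operations : List String) : Decidable (Pre_make_operations matrix operations) := by
  unfold Pre_make_operations; infer_instance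

def pvWitness_make_operations : List (List Int) × List String := ([[1, 2], [3, 4]], ["T", "RR 0", "RC -1"])

def Spec_make_operations (matrix : List (List Int)) (operations : List String) (out : List (List Int)) : Prop := out = make_operations_alt matrix operations
instance (matrix : List (List Int)) (operations : List String) (out : List (List Int)) : Decidable (Spec_make_operations matrix operations out) := by unfold Spec_make_operations; infer_instance

-- ===== CLAIM (what is proved, stated in full; the proofs are below) =====
def Claim_equal_make_operations : Prop := ∀ (matrix : List (List Int)) (operations : List String), Dom_make_operations matrix operations → Pre_make_operations matrix operations → Spec_make_operations matrix operations (make_operations matrix operations)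

-- ===== LEMMAS AND PROOFS =====

-- proof-only abbreviations
def pvNix (n : Nat) (i : Int) : Nat := if i < 0 then (i + n).toNat else i.toNat

def pvRect (m : List (List Int)) (c : Nat) : Prop := ∀ row ∈ m, row.length = c

def pvTrF (c : Nat) (m : List (List Int)) : List (List Int) :=
  (List.range c).map (fun j => m.map (fun row => row.getD j 0))

def pvRcS (m : List (List Int)) (j : Int) : List (List Int) :=
  m.mapIdx (fun k row => PySem.List.pySetD row j
    (PySem.List.pyGetD (PySem.List.pyGetD m ((m.length : Int) - 1 - k) []) j 0))

-- wrap normalisation for in-range Python indices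
theorem pvIdx?_in (n : Nat) (i : Int) (h1 : -(n : Int) ≤ i) (h2 : i < n) :
    PySem.List.pyIdx? n i = some (pvNix n i) ∧ pvNix n i < n := by
  unfold PySem.List.pyIdx? pvNix
  split_ifs with h3 h4 h5 <;> simp_all <;> omega

theorem pvGetD_in {α : Type} (l : List α) (i : Int) (d : α)
    (h1 : -(l.length : Int) ≤ i) (h2 : i < l.length) :
    PySem.List.pyGetD l i d = l.getD (pvNix l.length i) d := by
  obtain ⟨he, hlt⟩ := pvIdx?_in l.length i h1 h2
  simp [PySem.List.pyGetD, PySem.List.pyGet?, he, List.getD_eq_getElem?_getD]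

theorem pvSetD_in {α : Type} (l : List α) (i : Int) (v : α)
    (h1 : -(l.length : Int) ≤ i) (h2 : i < l.length) :
    PySem.List.pySetD l i v = l.set (pvNix l.length i) v := by
  obtain ⟨he, hlt⟩ := pvIdx?_in l.length i h1 h2
  simp [PySem.List.pySetD, PySem.List.pySet?, he]

theorem pvSetD_pyGetD_self {α : Type} (l : List α) (i : Int) (d : α) :
    PySem.List.pySetD l i (PySem.List.pyGetD l i d) = l := by
  by_cases h : -(l.length : Int) ≤ i ∧ i < l.length
  · obtain ⟨he, hlt⟩ := pvIdx?_in l.length i h.1 h.2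
    simp [PySem.List.pySetD, PySem.List.pySet?, PySem.List.pyGetD, PySem.List.pyGet?, he,
      List.getD_eq_getElem?_getD, hlt, List.set_getElem_self]
  · have : PySem.List.pyIdx? l.length i = none := by
      unfold PySem.List.pyIdx?
      split_ifs with h3 h4 h5 <;> simp_all <;> omega
    simp [PySem.List.pySetD, PySem.List.pySet?, this]

-- the write-back loop of A's reverse_col: sets each row once, left to right
theorem pvLoopSet (f : Int → List Int → List Int) :
    ∀ (todo pre : List (List Int)),
    (PySem.List.pyRange (pre.length : Int) ((pre.length + todo.length : Nat) : Int)).foldl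
      (fun mm i => PySem.List.pySetD mm i (f i (PySem.List.pyGetD mm i []))) (pre ++ todo)
    = pre ++ todo.mapIdx (fun k row => f ((pre.length + k : Nat) : Int) row) := by
  intro todo
  induction todo with
  | nil =>
    intro pre
    rw [PySem.List.pyRange_one_eq_nil (by simp)]
    simp
  | cons row todo ih =>
    intro pre
    have hlt : (pre.length : Int) < ((pre.length + (row :: todo).length : Nat) : Int) := by
      simp only [List.length_cons]; push_cast; omega
    rw [PySem.List.pyRange_one_cons hlt]
    simp only [List.foldl_cons]
    have hget : PySem.List.pyGetD (pre ++ row :: todo) (pre.length : Int) [] = row := by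
      simp [PySem.List.pyGetD, PySem.List.pyGet?_append_length]
    have hset : ∀ v, PySem.List.pySetD (pre ++ row :: todo) (pre.length : Int) v
        = (pre ++ [v]) ++ todo := by
      intro v
      rw [PySem.List.pySetD_natCast]
      rw [List.set_append_right _ _ (le_refl _)]
      simp
    rw [hget, hset]
    have harith1 : (pre.length : Int) + 1 = (((pre ++ [f (pre.length : Int) row]).length : Nat) : Int) := by
      simp
    have harith2 : ((pre.length + (row :: todo).length : Nat) : Int)
        = (((pre ++ [f (pre.length : Int) row]).length + todo.length : Nat) : Int) := by
      simp; omega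
    rw [harith1, harith2, ih (pre ++ [f (pre.length : Int) row])]
    simp only [List.append_assoc, List.mapIdx_cons, List.singleton_append, List.length_append,
      List.length_singleton]
    congr 2
    have : (fun (k : Nat) (r : List Int) => f (((pre.length + 1 + k : Nat) : Int)) r)
         = (fun (k : Nat) (r : List Int) => f (((pre.length + (k + 1) : Nat) : Int)) r) := by
      funext k r
      congr 1
      push_cast
      ring
    rw [this]

-- getting/setting at the boundary of an append
theorem pvGetD_append {α : Type} (pre ys : List α) (y : α) (d : α) :
    PySem.List.pyGetD (pre ++ y :: ys) (pre.length : Int) d = y := by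
  simp [PySem.List.pyGetD, PySem.List.pyGet?_append_length]

theorem pvSetD_append {α : Type} (pre ys : List α) (y v : α) :
    PySem.List.pySetD (pre ++ y :: ys) (pre.length : Int) v = pre ++ v :: ys := by
  rw [PySem.List.pySetD_natCast]
  rw [List.set_append_right _ _ (le_refl _)]
  simp

-- pvRcS as a zipWith against the reversed column
theorem pvRcS_eq_zipWith (m : List (List Int)) (col : Int) :
    pvRcS m col
    = List.zipWith (fun row v => PySem.List.pySetD row col v) m
        (m.reverse.map (fun r => PySem.List.pyGetD r col 0)) := by
  unfold pvRcS
  apply List.ext_getElem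
  · simp
  · intro k hk1 hk2
    have hk : k < m.length := by simpa using hk1
    rw [List.getElem_mapIdx, List.getElem_zipWith]
    congr 1
    have h2 : PySem.List.pyGetD m ((m.length : Int) - 1 - k) [] = m[m.length - 1 - k] := by
      have : ((m.length : Int) - 1 - k) = ((m.length - 1 - k : Nat) : Int) := by
        push_cast [Nat.cast_sub, hk]; omega
      rw [this, PySem.List.pyGetD_natCast, List.getD_eq_getElem?_getD,
        List.getElem?_eq_getElem (by omega : m.length - 1 - k < m.length)]
      rfl
    rw [h2]
    rw [List.getElem_map, List.getElem_reverse]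

theorem pvRcS_nil (col : Int) : pvRcS [] col = [] := by simp [pvRcS]

theorem pvRcS_singleton (a : List Int) (col : Int) : pvRcS [a] col = [a] := by
  rw [pvRcS_eq_zipWith]
  simp [pvSetD_pyGetD_self]

theorem pvRcS_cons_concat (a b : List Int) (ws : List (List Int)) (col : Int) :
    pvRcS (a :: (ws ++ [b])) col
    = PySem.List.pySetD a col (PySem.List.pyGetD b col 0)
      :: (pvRcS ws col ++ [PySem.List.pySetD b col (PySem.List.pyGetD a col 0)]) := by
  rw [pvRcS_eq_zipWith, pvRcS_eq_zipWith]
  simp only [List.reverse_cons, List.reverse_append, List.reverse_cons, List.reverse_nil,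
    List.nil_append, List.singleton_append, List.map_cons, List.map_append, List.cons_append]
  rw [List.zipWith_cons_cons]
  congr 1
  rw [List.zipWith_append (h := by simp)]
  simp

-- the swap step of B's column reversal, with the captured length n made explicit
def pvSwapStep (col n : Int) (g : List (List Int)) (i : Int) : List (List Int) :=
  let k : Int := n - 1 - i
  let vi := PySem.List.pyGetD (PySem.List.pyGetD g i []) col 0
  let vk := PySem.List.pyGetD (PySem.List.pyGetD g k []) col 0
  let g1 := PySem.List.pySetD g i (PySem.List.pySetD (PySem.List.pyGetD g i []) col vk)
  PySem.List.pySetD g1 k (PySem.List.pySetD (PySem.List.pyGetD g1 k []) col vi)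

theorem pvSwapCol_eq_foldl (g : List (List Int)) (col : Int) :
    pvSwapCol g col
    = (PySem.List.pyRange 0 (PySem.Int.floordiv ((g.length : Nat) : Int) 2)).foldl
        (pvSwapStep col ((g.length : Nat) : Int)) g := rfl

theorem pvLoopSwap (col : Int) :
    ∀ (L : Nat) (mid pre suf : List (List Int)) (n : Int), mid.length = L →
    pre.length = suf.length →
    n = ((pre.length + L + suf.length : Nat) : Int) →
    (PySem.List.pyRange (pre.length : Int) (PySem.Int.floordiv n 2)).foldl
        (pvSwapStep col n) (pre ++ mid ++ suf)
    = pre ++ pvRcS mid col ++ suf := by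
  intro L
  induction L using Nat.strong_induction_on with
  | _ L ih =>
  intro mid pre suf n hL hps hn
  by_cases hsmall : L ≤ 1
  · -- no iteration: floordiv n 2 ≤ pre.length
    have : PySem.Int.floordiv n 2 ≤ (pre.length : Int) := by
      rw [hn, show (2 : Int) = ((2 : Nat) : Int) from rfl, PySem.Int.floordiv_natCast]
      exact_mod_cast Nat.le_of_lt_succ (by omega : (pre.length + L + suf.length) / 2 < pre.length + 1)
    rw [PySem.List.pyRange_one_eq_nil this]
    interval_cases L
    · rw [List.length_eq_zero_iff] at hL
      subst hL; rw [pvRcS_nil]; rfl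
    · obtain ⟨a, ha⟩ := List.length_eq_one_iff.mp hL
      subst ha; rw [pvRcS_singleton]; rfl
  · -- L ≥ 2 : mid = a :: (ws ++ [b])
    obtain ⟨a, t, rfl⟩ : ∃ a t, mid = a :: t := by
      cases mid with
      | nil => simp at hL; omega
      | cons a t => exact ⟨a, t, rfl⟩
    obtain ⟨ws, b, rfl⟩ : ∃ ws b, t = ws ++ [b] := by
      rcases t.eq_nil_or_concat with h | ⟨ws, b, h⟩
      · subst h; simp at hL; omega
      · exact ⟨ws, b, by simpa [List.concat_eq_append] using h⟩
    have hws : ws.length + 2 = L := by simpa using hL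
    have hcons : PySem.List.pyRange (pre.length : Int) (PySem.Int.floordiv n 2)
        = (pre.length : Int) :: PySem.List.pyRange ((pre.length : Int) + 1) (PySem.Int.floordiv n 2) := by
      apply PySem.List.pyRange_one_cons
      rw [hn, show (2 : Int) = ((2 : Nat) : Int) from rfl, PySem.Int.floordiv_natCast]
      exact_mod_cast (by omega : pre.length < (pre.length + L + suf.length) / 2)
    rw [hcons, List.foldl_cons]
    -- the two positions touched by the first swap
    have hk : n - 1 - (pre.length : Int) = ((pre.length + 1 + ws.length : Nat) : Int) := by
      rw [hn, ← hps]; push_cast; omega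
    have hshape : pre ++ (a :: (ws ++ [b])) ++ suf = pre ++ a :: (ws ++ b :: suf) := by simp
    have hgetb : ∀ x : List Int, PySem.List.pyGetD (pre ++ x :: (ws ++ b :: suf))
        ((pre.length + 1 + ws.length : Nat) : Int) [] = b := by
      intro x
      rw [show pre ++ x :: (ws ++ b :: suf) = (pre ++ x :: ws) ++ b :: suf by simp,
        show ((pre.length + 1 + ws.length : Nat) : Int) = (((pre ++ x :: ws).length : Nat) : Int) by
          simp; push_cast; ring]
      exact pvGetD_append _ _ _ _
    have hsetb : ∀ (x : List Int) (v : List Int),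
        PySem.List.pySetD (pre ++ x :: (ws ++ b :: suf)) ((pre.length + 1 + ws.length : Nat) : Int) v
        = (pre ++ [x]) ++ ws ++ v :: suf := by
      intro x v
      rw [show pre ++ x :: (ws ++ b :: suf) = (pre ++ x :: ws) ++ b :: suf by simp,
        show ((pre.length + 1 + ws.length : Nat) : Int) = (((pre ++ x :: ws).length : Nat) : Int) by
          simp; push_cast; ring]
      rw [pvSetD_append]
      simp
    have hstep : pvSwapStep col n (pre ++ (a :: (ws ++ [b])) ++ suf) ((pre.length : Nat) : Int)
        = (pre ++ [PySem.List.pySetD a col (PySem.List.pyGetD b col 0)]) ++ ws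
          ++ ((PySem.List.pySetD b col (PySem.List.pyGetD a col 0)) :: suf) := by
      simp only [pvSwapStep, hshape, hk]
      rw [pvGetD_append pre (ws ++ b :: suf) a, hgetb a, pvSetD_append pre (ws ++ b :: suf) a,
        hgetb _, hsetb _ _]
    rw [hstep]
    have harith : (pre.length : Int) + 1
        = (((pre ++ [PySem.List.pySetD a col (PySem.List.pyGetD b col 0)]).length : Nat) : Int) := by
      simp
    rw [harith]
    rw [ih ws.length (by omega) ws _ _ n rfl (by simp [hps])
      (by rw [hn]; simp; push_cast; omega)]
    rw [pvRcS_cons_concat]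
    simp

theorem pvSwapCol_eq (g : List (List Int)) (col : Int) :
    pvSwapCol g col = pvRcS g col := by
  rw [pvSwapCol_eq_foldl]
  have := pvLoopSwap col g.length g [] [] ((g.length : Nat) : Int) rfl rfl (by simp)
  simpa using this

-- A's transpose function computes pvTrF (with Python's len(matrix[0]) column count)
theorem pvTranspose_eq (m : List (List Int)) :
    pvTranspose m = pvTrF ((m.headD []).length) m := by
  unfold pvTranspose pvTrF
  simp only [PySem.List.foldl_append_singleton_eq_map, List.nil_append]
  have hhead : PySem.List.pyGetD m 0 [] = m.headD [] := by
    cases m <;> simp [PySem.List.pyGetD, PySem.List.pyGet?, PySem.List.pyIdx?]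
  rw [hhead]
  rw [PySem.List.pyRange_zero_nat ((m.headD []).length), PySem.List.pyRange_zero_nat m.length]
  rw [List.map_map]
  apply List.map_congr_left
  intro j hj
  simp only [Function.comp_apply, List.map_map]
  apply List.ext_getElem
  · simp
  · intro k hk1 hk2
    have hk : k < m.length := by simpa using hk2
    simp only [Function.comp_apply, List.getElem_map, List.getElem_range]
    rw [PySem.List.pyGetD_natCast, PySem.List.pyGetD_natCast]
    rw [List.getD_eq_getElem?_getD (l := m), List.getElem?_eq_getElem hk]
    simp

-- B's zip-transpose computes pvTrF on rectangular nonempty matrices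
theorem pvZipTGo_eq : ∀ (c : Nat) (fuel : Nat) (m : List (List Int)),
    pvRect m c → m ≠ [] → c ≤ fuel → pvZipTGo fuel m = pvTrF c m := by
  intro c
  induction c with
  | zero =>
    intro fuel m hrect hne _
    have hany : m = [] ∨ m.any List.isEmpty = true := by
      cases m with
      | nil => exact Or.inl rfl
      | cons a t =>
        refine Or.inr (List.any_eq_true.mpr ⟨a, by simp, ?_⟩)
        have := hrect a (by simp)
        simpa [List.isEmpty_iff, List.length_eq_zero_iff] using this
    cases fuel with
    | zero => simp [pvZipTGo, pvTrF]
    | succ f =>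
      rw [pvZipTGo]
      simp only [pvTrF, List.range_zero, List.map_nil]
      rcases hany with h | h
      · simp [h]
      · simp [h]
  | succ k ih =>
    intro fuel m hrect hne hle
    cases fuel with
    | zero => omega
    | succ f =>
      rw [pvZipTGo]
      have hcond : ¬(m = [] || m.any List.isEmpty) = true := by
        simp only [Bool.or_eq_true, decide_eq_true_eq]
        rintro (h | h)
        · exact hne h
        · obtain ⟨row, hrow, hemp⟩ := List.any_eq_true.mp h
          have := hrect row hrow
          rw [List.isEmpty_iff] at hemp
          simp [hemp] at this
      rw [if_neg hcond]
      rw [ih f (m.map List.tail)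
        (by intro row hrow
            obtain ⟨r0, hr0, rfl⟩ := List.mem_map.mp hrow
            have := hrect r0 hr0
            simp [this])
        (by simpa using hne) (by omega)]
      unfold pvTrF
      rw [List.range_succ_eq_map]
      simp only [List.map_cons, List.map_map]
      congr 1
      · apply List.map_congr_left
        intro row _
        cases row <;> simp
      · apply List.map_congr_left
        intro j _
        simp only [Function.comp_apply]
        apply List.map_congr_left
        intro row _
        simp [List.getD_eq_getElem?_getD, List.getElem?_tail, Nat.succ_eq_add_one]

theorem pvZipT_eq (m : List (List Int)) (c : Nat) (hrect : pvRect m c) (hne : m ≠ []) :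
    pvZipT m = pvTrF c m := by
  unfold pvZipT
  have : (m.headD []).length = c := by
    cases m with
    | nil => exact absurd rfl hne
    | cons a t => exact hrect a (by simp)
  rw [this]
  exact pvZipTGo_eq c c m hrect hne (le_refl c)

theorem pvTrF_length (c : Nat) (m : List (List Int)) : (pvTrF c m).length = c := by simp [pvTrF]

theorem pvRect_trF (c : Nat) (m : List (List Int)) : pvRect (pvTrF c m) m.length := by
  intro row hrow
  obtain ⟨j, hj, rfl⟩ := List.mem_map.mp hrow
  simp

theorem pvGetD_set_self {α : Type} (l : List α) (k : Nat) (v d : α) (h : k < l.length) :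
    (l.set k v).getD k d = v := by
  rw [List.getD_eq_getElem?_getD, List.getElem?_set_self h]; rfl

theorem pvGetD_set_ne {α : Type} (l : List α) (i j : Nat) (v d : α) (h : i ≠ j) :
    (l.set i v).getD j d = l.getD j d := by
  rw [List.getD_eq_getElem?_getD, List.getElem?_set_ne h, ← List.getD_eq_getElem?_getD]

theorem pvGetD_rev {α : Type} (l : List α) (j : Nat) (d : α) (h : j < l.length) :
    l.reverse.getD j d = l.getD (l.length - 1 - j) d := by
  rw [List.getD_eq_getElem?_getD, List.getElem?_reverse h, List.getD_eq_getElem?_getD]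

theorem pvTrF_getElem (c : Nat) (m : List (List Int)) (j : Nat) (h : j < (pvTrF c m).length) :
    (pvTrF c m)[j] = m.map (fun row => row.getD j 0) := by
  simp [pvTrF]

theorem pvTrF_trF (m : List (List Int)) (c : Nat) (hrect : pvRect m c) :
    pvTrF m.length (pvTrF c m) = m := by
  apply List.ext_getElem
  · simp [pvTrF]
  · intro i hi1 hi2
    have hi : i < m.length := by simpa [pvTrF] using hi1
    rw [pvTrF_getElem]
    apply List.ext_getElem
    · have := hrect m[i] (by simp)
      simp [pvTrF_length, this]
    · intro j hj1 hj2
      have hj : j < c := by simpa [pvTrF_length] using hj1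
      rw [List.getElem_map, pvTrF_getElem]
      rw [List.getD_eq_getElem?_getD, List.getElem?_map, List.getElem?_eq_getElem hi]
      simp only [Option.map_some, Option.getD_some]
      rw [List.getD_eq_getElem?_getD, List.getElem?_eq_getElem (by
        rw [hrect m[i] (by simp)]; exact hj)]
      rfl

-- Int-index forms reduced to Nat forms under the range precondition
theorem pvReverseRow_nat (m : List (List Int)) (i : Int)
    (h1 : -(m.length : Int) ≤ i) (h2 : i < m.length) :
    pvReverseRow m i = m.set (pvNix m.length i) ((m.getD (pvNix m.length i) []).reverse) := by
  unfold pvReverseRow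
  rw [pvGetD_in _ _ _ h1 h2, pvSetD_in _ _ _ h1 h2]

theorem pvRcS_nat (m : List (List Int)) (c : Nat) (hrect : pvRect m c) (j : Int)
    (h1 : -(c : Int) ≤ j) (h2 : j < c) :
    pvRcS m j = m.mapIdx (fun k row =>
      row.set (pvNix c j) ((m.getD (m.length - 1 - k) []).getD (pvNix c j) 0)) := by
  unfold pvRcS
  apply List.ext_getElem
  · simp
  · intro k hk1 hk2
    have hk : k < m.length := by simpa using hk1
    simp only [List.getElem_mapIdx]
    have hrow : m[k].length = c := hrect m[k] (by simp)
    have hmid : PySem.List.pyGetD m ((m.length : Int) - 1 - k) [] = m.getD (m.length - 1 - k) [] := by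
      have : ((m.length : Int) - 1 - k) = ((m.length - 1 - k : Nat) : Int) := by push_cast; omega
      rw [this, PySem.List.pyGetD_natCast]
    rw [hmid]
    have hmidlen : (m.getD (m.length - 1 - k) []).length = c := by
      rw [List.getD_eq_getElem?_getD, List.getElem?_eq_getElem (by omega : m.length - 1 - k < m.length)]
      exact hrect _ (by simp)
    rw [pvSetD_in _ _ _ (by rw [hrow]; exact h1) (by rw [hrow]; exact_mod_cast h2)]
    rw [pvGetD_in _ _ _ (by rw [hmidlen]; exact h1) (by rw [hmidlen]; exact_mod_cast h2)]
    rw [hrow, hmidlen]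

-- reversing a logical row of the transpose = pvRcS on the grid (Nat form)
theorem pvCommute_rr (m : List (List Int)) (c : Nat) (hrect : pvRect m c) (k : Nat) (hk : k < c) :
    (pvTrF c m).set k (((pvTrF c m).getD k []).reverse)
    = pvTrF c (m.mapIdx (fun t row => row.set k ((m.getD (m.length - 1 - t) []).getD k 0))) := by
  have htl : (pvTrF c m).length = c := pvTrF_length c m
  apply List.ext_getElem
  · simp [pvTrF]
  · intro j hj1 hj2
    have hj : j < c := by simpa [pvTrF] using hj2
    rw [List.getElem_set]
    by_cases hjk : k = j
    · subst hjk
      rw [if_pos rfl]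
      rw [pvTrF_getElem]
      rw [List.getD_eq_getElem?_getD, List.getElem?_eq_getElem (by rw [htl]; exact hk),
        Option.getD_some, pvTrF_getElem]
      apply List.ext_getElem
      · simp
      · intro t ht1 ht2
        have ht : t < m.length := by simpa using ht2
        rw [List.getElem_reverse]
        simp only [List.getElem_map, List.getElem_mapIdx, List.length_map]
        rw [pvGetD_set_self _ _ _ _ (by
          have : m[t].length = c := hrect _ (by simp)
          rw [this]; exact hk)]
        rw [List.getD_eq_getElem?_getD (l := m), List.getElem?_eq_getElem
          (by omega : m.length - 1 - t < m.length), Option.getD_some]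
    · rw [if_neg hjk]
      rw [pvTrF_getElem, pvTrF_getElem]
      apply List.ext_getElem
      · simp
      · intro t ht1 ht2
        have ht : t < m.length := by simpa using ht2
        simp only [List.getElem_map, List.getElem_mapIdx]
        rw [pvGetD_set_ne _ _ _ _ _ (by omega)]

-- reversing a logical column of the transpose = row reversal on the grid (Nat form)
theorem pvCommute_rc (m : List (List Int)) (c : Nat) (hrect : pvRect m c) (k : Nat)
    (hk : k < m.length) :
    (pvTrF c m).mapIdx (fun t col' =>
      col'.set k (((pvTrF c m).getD ((pvTrF c m).length - 1 - t) []).getD k 0))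
    = pvTrF c (m.set k ((m.getD k []).reverse)) := by
  have htl : (pvTrF c m).length = c := pvTrF_length c m
  have hgetm : m.getD k [] = m[k] := by
    rw [List.getD_eq_getElem?_getD, List.getElem?_eq_getElem hk]; rfl
  have hklen : m[k].length = c := hrect _ (by simp)
  apply List.ext_getElem
  · simp [pvTrF]
  · intro j hj1 hj2
    have hj : j < c := by simpa [pvTrF] using hj2
    simp only [List.getElem_mapIdx]
    rw [pvTrF_getElem]
    have hval : ((pvTrF c m).getD ((pvTrF c m).length - 1 - j) []).getD k 0
        = m[k].getD (c - 1 - j) 0 := by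
      rw [htl]
      rw [List.getD_eq_getElem?_getD (l := pvTrF c m), List.getElem?_eq_getElem
        (by rw [htl]; omega : c - 1 - j < (pvTrF c m).length), Option.getD_some]
      rw [pvTrF_getElem]
      rw [List.getD_eq_getElem?_getD (l := List.map (fun row => row.getD (c - 1 - j) 0) m),
        List.getElem?_map, List.getElem?_eq_getElem hk]
      simp
    rw [hval]
    rw [pvTrF_getElem]
    apply List.ext_getElem
    · simp
    · intro t ht1 ht2
      have ht : t < m.length := by simpa using ht2
      rw [List.getElem_set]
      simp only [List.getElem_map]
      by_cases hkt : k = t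
      · subst hkt
        rw [if_pos rfl]
        rw [List.getElem_set_self]
        rw [hgetm]
        rw [pvGetD_rev _ _ _ (by rw [hklen]; exact hj)]
        congr 1
        rw [hklen]
      · rw [if_neg hkt]
        rw [List.getElem_set_ne (by omega)]

-- A's reverse_col computes pvRcS
theorem pvReverseCol_eq (m : List (List Int)) (col : Int) :
    pvReverseCol m col = pvRcS m col := by
  unfold pvReverseCol
  rw [PySem.List.foldl_append_singleton_eq_map]
  simp only [List.nil_append]
  have hlen : ((m.map (fun row => PySem.List.pyGetD row col 0)).reverse.length : Nat) = m.length := by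
    simp
  rw [hlen]
  have := pvLoopSet (fun i r => PySem.List.pySetD r col
      (PySem.List.pyGetD (m.map (fun row => PySem.List.pyGetD row col 0)).reverse i 0)) m []
  simp only [List.length_nil, List.nil_append, Nat.cast_zero, Nat.zero_add, Int.zero_add] at this
  rw [this]
  unfold pvRcS
  apply List.ext_getElem
  · simp
  · intro k hk1 hk2
    simp only [List.getElem_mapIdx]
    congr 1
    have hk : k < m.length := by simpa using hk1
    have h1 : PySem.List.pyGetD (m.map (fun row => PySem.List.pyGetD row col 0)).reverse ((k : Nat) : Int) 0
        = PySem.List.pyGetD (m[m.length - 1 - k]) col 0 := by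
      rw [PySem.List.pyGetD_natCast]
      rw [List.getD_eq_getElem?_getD]
      rw [List.getElem?_reverse (by simpa using hk)]
      simp [List.getElem?_map, List.getElem?_eq_getElem (by omega : m.length - 1 - k < m.length)]
    have h2 : PySem.List.pyGetD m ((m.length : Int) - 1 - k) [] = m[m.length - 1 - k] := by
      have : ((m.length : Int) - 1 - k) = ((m.length - 1 - k : Nat) : Int) := by
        push_cast [Nat.cast_sub, hk]; omega
      rw [this, PySem.List.pyGetD_natCast, List.getD_eq_getElem?_getD,
        List.getElem?_eq_getElem (by omega : m.length - 1 - k < m.length)]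
      simp
    rw [h1, h2]

-- shape preservation
theorem pvIdx?_lt (n : Nat) (i : Int) (k : Nat) (h : PySem.List.pyIdx? n i = some k) : k < n := by
  unfold PySem.List.pyIdx? at h
  split_ifs at h <;> simp_all <;> omega

theorem pvLen_pvReverseRow (m : List (List Int)) (i : Int) :
    (pvReverseRow m i).length = m.length := by
  unfold pvReverseRow; rw [PySem.List.length_pySetD]

theorem pvRect_set (m : List (List Int)) (c : Nat) (k : Nat) (v : List Int)
    (hrect : pvRect m c) (hv : v.length = c) : pvRect (m.set k v) c := by
  intro row hrow
  rcases List.mem_or_eq_of_mem_set hrow with h | h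
  · exact hrect row h
  · rw [h]; exact hv

theorem pvRect_pvReverseRow (m : List (List Int)) (c : Nat) (i : Int) (hrect : pvRect m c) :
    pvRect (pvReverseRow m i) c := by
  unfold pvReverseRow PySem.List.pySetD PySem.List.pySet? PySem.List.pyGetD PySem.List.pyGet?
  cases h : PySem.List.pyIdx? m.length i with
  | none => simpa [h] using hrect
  | some k =>
    have hk := pvIdx?_lt m.length i k h
    simp only [h, Option.map_some, Option.getD_some, Option.bind_some]
    rw [List.getElem?_eq_getElem hk]
    simp only [Option.getD_some]
    exact pvRect_set m c k _ hrect (by simpa using hrect m[k] (by simp))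

theorem pvLen_pvRcS (m : List (List Int)) (j : Int) : (pvRcS m j).length = m.length := by
  simp [pvRcS]

theorem pvRect_pvRcS (m : List (List Int)) (c : Nat) (j : Int) (hrect : pvRect m c) :
    pvRect (pvRcS m j) c := by
  intro row hrow
  obtain ⟨k, hk, rfl⟩ := List.mem_iff_getElem.mp hrow
  unfold pvRcS
  rw [List.getElem_mapIdx]
  rw [PySem.List.length_pySetD]
  exact hrect _ (by simp)

-- the two fold bodies, named (definitionally equal to the ports' lambdas)
def pvAStep (m : List (List Int)) (operation : String) : List (List Int) :=
  let op_split := pvTok operation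
  if PySem.List.pyGetD op_split 0 "" = "T" then pvTranspose m
  else if PySem.List.pyGetD op_split 0 "" = "RR" then
    pvReverseRow m ((PySem.Int.ofStr? (PySem.List.pyGetD op_split 1 "")).getD 0)
  else if PySem.List.pyGetD op_split 0 "" = "RC" then
    pvReverseCol m ((PySem.Int.ofStr? (PySem.List.pyGetD op_split 1 "")).getD 0)
  else m

def pvBStep (st : List (List Int) × Bool) (operation : String) : List (List Int) × Bool :=
  let parts := pvTok operation
  let head := PySem.List.pyGetD parts 0 ""
  if head = "T" then (st.1, !st.2)
  else if head = "RR" ∨ head = "RC" then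
    let idx := (PySem.Int.ofStr? (PySem.List.pyGetD parts 1 "")).getD 0
    if ((head == "RR") != st.2) = true then
      (PySem.List.pySetD st.1 idx (PySem.List.pyGetD st.1 idx []).reverse, st.2)
    else
      (pvSwapCol st.1 idx, st.2)
  else st

theorem pvA_eq_foldl (matrix : List (List Int)) (operations : List String) :
    make_operations matrix operations = operations.foldl pvAStep matrix := rfl

theorem pvB_eq_foldl (matrix : List (List Int)) (operations : List String) :
    make_operations_alt matrix operations
    = (if (operations.foldl pvBStep (matrix, false)).2 then
        pvZipT (operations.foldl pvBStep (matrix, false)).1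
      else (operations.foldl pvBStep (matrix, false)).1) := rfl

-- index extraction from a validated operation
theorem pvIdx_extract (op : String) (n : Int) (h : pvWithin (pvIdx? op) n = true) :
    ∃ i : Int, pvIdx? op = some i ∧ -n ≤ i ∧ i < n ∧
      (PySem.Int.ofStr? (PySem.List.pyGetD (pvTok op) 1 "")).getD 0 = i := by
  unfold pvWithin at h
  cases hx : pvIdx? op with
  | none => rw [hx] at h; simp at h
  | some i =>
    rw [hx] at h
    refine ⟨i, rfl, ?_, ?_, ?_⟩
    · have := of_decide_eq_true h; exact this.1
    · have := of_decide_eq_true h; exact this.2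
    · unfold pvIdx? at hx
      cases h1 : (pvTok op)[1]? with
      | none => rw [h1] at hx; simp at hx
      | some str =>
        rw [h1] at hx
        simp only [] at hx
        have hlen : 1 < (pvTok op).length := by
          rcases lt_or_ge 1 (pvTok op).length with hl | hl
          · exact hl
          · rw [List.getElem?_eq_none hl] at h1
            simp at h1
        have hidx : PySem.List.pyIdx? (pvTok op).length 1 = some 1 := by
          unfold PySem.List.pyIdx?
          rw [if_pos (by omega), if_pos (by exact_mod_cast hlen)]
          rfl
        have hget : PySem.List.pyGetD (pvTok op) 1 "" = str := by
          simp [PySem.List.pyGetD, PySem.List.pyGet?, hidx, h1]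
        rw [hget, hx]
        rfl

-- recursive validity (what the ∀-indexed precondition means, fold-style)
def pvOpsOK (r c : Int) : List String → Prop
  | [] => True
  | op :: rest =>
    (pvHead op = "RR" → pvWithin (pvIdx? op) r = true) ∧
    (pvHead op = "RC" → pvWithin (pvIdx? op) c = true) ∧
    pvOpsOK (if pvHead op == "T" then c else r) (if pvHead op == "T" then r else c) rest

theorem pvPre_toOpsOK : ∀ (ops : List String) (R C : Int),
    (∀ k, (hk : k < ops.length) →
      (if ((ops.take k).countP (fun op => pvHead op == "T")) % 2 = 0 then
        (pvHead ops[k] = "RR" → pvWithin (pvIdx? ops[k]) R = true) ∧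
        (pvHead ops[k] = "RC" → pvWithin (pvIdx? ops[k]) C = true)
      else
        (pvHead ops[k] = "RR" → pvWithin (pvIdx? ops[k]) C = true) ∧
        (pvHead ops[k] = "RC" → pvWithin (pvIdx? ops[k]) R = true))) →
    pvOpsOK R C ops := by
  intro ops
  induction ops with
  | nil => intro R C _; trivial
  | cons op rest ih =>
    intro R C H
    have h0 := H 0 (by simp)
    simp only [List.take_zero, List.countP_nil, Nat.zero_mod, if_pos rfl, List.getElem_cons_zero] at h0
    refine ⟨h0.1, h0.2, ?_⟩
    by_cases hT : pvHead op == "T"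
    · rw [if_pos hT, if_pos hT]
      apply ih
      intro k hk
      have := H (k + 1) (by simpa using hk)
      simp only [List.take_succ_cons, List.countP_cons, hT, if_pos, List.getElem_cons_succ] at this
      by_cases hpar : ((rest.take k).countP (fun op => pvHead op == "T")) % 2 = 0
      · rw [if_pos hpar]
        rw [if_neg (by omega)] at this
        exact this
      · rw [if_neg hpar]
        rw [if_pos (by omega)] at this
        exact this
    · rw [if_neg hT, if_neg hT]
      apply ih
      intro k hk
      have := H (k + 1) (by simpa using hk)
      simp only [List.take_succ_cons, List.countP_cons, hT, List.getElem_cons_succ] at this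
      simpa using this

-- the no-transpose case: the two fold bodies agree step by step
theorem pvFlat : ∀ (ops : List String) (m : List (List Int)),
    (∀ op ∈ ops, pvHead op ≠ "T") →
    ops.foldl pvAStep m = (ops.foldl pvBStep (m, false)).1 ∧
      (ops.foldl pvBStep (m, false)).2 = false := by
  intro ops
  induction ops with
  | nil => intro m _; exact ⟨rfl, rfl⟩
  | cons op rest ih =>
    intro m hall
    have hT : pvHead op ≠ "T" := hall op (by simp)
    have hstep : pvBStep (m, false) op = (pvAStep m op, false) := by
      simp only [pvBStep, pvAStep]
      rw [show PySem.List.pyGetD (pvTok op) 0 "" = pvHead op from rfl]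
      rw [if_neg hT, if_neg hT]
      by_cases hRR : pvHead op = "RR"
      · rw [if_pos (Or.inl hRR), if_pos hRR]
        rw [if_pos (by simp [hRR])]
        rfl
      · by_cases hRC : pvHead op = "RC"
        · rw [if_pos (Or.inr hRC), if_neg hRR, if_pos hRC]
          rw [if_neg (by
            simp only [bne_iff_ne, ne_eq, not_not]
            simp [show (pvHead op == "RR") = false by simp [hRR]])]
          rw [pvSwapCol_eq, ← pvReverseCol_eq]
        · rw [if_neg (by rintro (h | h) <;> [exact hRR h; exact hRC h]), if_neg hRR, if_neg hRC]
    rw [List.foldl_cons, List.foldl_cons, hstep]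
    exact ih (pvAStep m op) (fun o ho => hall o (by simp [ho]))

-- the transpose-present case: invariant "A's matrix is the (lazy) view of B's grid"
theorem pvMain : ∀ (ops : List String) (g : List (List Int)) (fl : Bool) (r c : Nat),
    1 ≤ r → 1 ≤ c → g.length = r → pvRect g c →
    pvOpsOK (if fl then (c : Int) else (r : Int)) (if fl then (r : Int) else (c : Int)) ops →
    ∃ g' fl',
      ops.foldl pvAStep (if fl then pvTrF c g else g) = (if fl' then pvTrF c g' else g') ∧
      ops.foldl pvBStep (g, fl) = (g', fl') ∧ g'.length = r ∧ pvRect g' c := by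
  intro ops
  induction ops with
  | nil => exact fun g fl r c _ _ h3 h4 _ => ⟨g, fl, rfl, rfl, h3, h4⟩
  | cons op rest ih =>
    intro g fl r c hr hc hlen hrect hok
    obtain ⟨hRRok, hRCok, hrest⟩ := hok
    have hne : g ≠ [] := by
      intro h; rw [h] at hlen; simp at hlen; omega
    rw [List.foldl_cons, List.foldl_cons]
    by_cases hT : pvHead op = "T"
    · -- transpose: toggle the flag
      have hA : pvAStep (if fl then pvTrF c g else g) op = (if !fl then pvTrF c g else g) := by
        simp only [pvAStep]
        rw [show PySem.List.pyGetD (pvTok op) 0 "" = pvHead op from rfl]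
        rw [if_pos hT]
        cases fl with
        | false =>
          simp only [Bool.not_false, Bool.false_eq_true, eq_self_iff_true, if_true, if_false]
          rw [pvTranspose_eq]
          have : (g.headD []).length = c := by
            cases g with
            | nil => exact absurd rfl hne
            | cons a t => exact hrect a (by simp)
          rw [this]
        | true =>
          simp only [Bool.not_true, Bool.false_eq_true, eq_self_iff_true, if_true, if_false]
          rw [pvTranspose_eq]
          have hhead : ((pvTrF c g).headD []).length = g.length := by
            have hc1 : (pvTrF c g) ≠ [] := by
              intro h
              have := pvTrF_length c g
              rw [h] at this
              simp at this; omega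
            cases hcg : pvTrF c g with
            | nil => exact absurd hcg hc1
            | cons a t =>
              have : a ∈ pvTrF c g := by rw [hcg]; simp
              have := pvRect_trF c g a this
              simpa [hcg] using this
          rw [hhead, pvTrF_trF g c hrect]
      have hB : pvBStep (g, fl) op = (g, !fl) := by
        simp only [pvBStep]
        rw [show PySem.List.pyGetD (pvTok op) 0 "" = pvHead op from rfl]
        rw [if_pos hT]
      rw [hA, hB]
      have hok' : pvOpsOK (if !fl then (c : Int) else (r : Int))
          (if !fl then (r : Int) else (c : Int)) rest := by
        have hTb : (pvHead op == "T") = true := by simp [hT]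
        rw [hTb] at hrest
        cases fl <;> simpa using hrest
      exact ih g (!fl) r c hr hc hlen hrect hok'
    · by_cases hRR : pvHead op = "RR"
      · obtain ⟨i, hi, hge, hlt, hidx⟩ := pvIdx_extract op _ (hRRok hRR)
        have hok' : pvOpsOK (if fl then (c : Int) else (r : Int))
            (if fl then (r : Int) else (c : Int)) rest := by
          have hTb : (pvHead op == "T") = false := by simp [hT]
          rw [hTb] at hrest
          simpa using hrest
        have hAcond : pvAStep (if fl then pvTrF c g else g) op
            = pvReverseRow (if fl then pvTrF c g else g) i := by
          simp only [pvAStep]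
          rw [show PySem.List.pyGetD (pvTok op) 0 "" = pvHead op from rfl]
          rw [if_neg hT, if_pos hRR, hidx]
        cases fl with
        | false =>
          simp only [if_false] at hAcond hok' ⊢
          simp only [Bool.false_eq_true, if_false] at hge hlt
          have hB : pvBStep (g, false) op = (pvReverseRow g i, false) := by
            simp only [pvBStep]
            rw [show PySem.List.pyGetD (pvTok op) 0 "" = pvHead op from rfl]
            rw [if_neg hT, if_pos (Or.inl hRR), if_pos (by simp [hRR]), hidx]
            rfl
          rw [hAcond, hB]
          obtain ⟨g', fl', h1, h2, h3, h4⟩ := ih (pvReverseRow g i) false r c hr hc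
            (by rw [pvLen_pvReverseRow, hlen]) (pvRect_pvReverseRow g c i hrect) hok'
          exact ⟨g', fl', by simpa using h1, h2, h3, h4⟩
        | true =>
          simp only [if_true] at hAcond hok' ⊢
          simp only [if_true] at hge hlt
          have hB : pvBStep (g, true) op = (pvRcS g i, true) := by
            simp only [pvBStep]
            rw [show PySem.List.pyGetD (pvTok op) 0 "" = pvHead op from rfl]
            rw [if_neg hT, if_pos (Or.inl hRR), hidx]
            rw [if_neg (by simp [hRR])]
            rw [pvSwapCol_eq]
          have hnix := pvIdx?_in c i hge hlt
          have hAval : pvReverseRow (pvTrF c g) i = pvTrF c (pvRcS g i) := by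
            rw [pvReverseRow_nat (pvTrF c g) i (by rw [pvTrF_length]; exact hge)
              (by rw [pvTrF_length]; exact hlt)]
            rw [pvTrF_length]
            rw [pvRcS_nat g c hrect i hge hlt]
            exact pvCommute_rr g c hrect (pvNix c i) hnix.2
          rw [hAcond, hAval, hB]
          obtain ⟨g', fl', h1, h2, h3, h4⟩ := ih (pvRcS g i) true r c hr hc
            (by rw [pvLen_pvRcS, hlen]) (pvRect_pvRcS g c i hrect) hok'
          exact ⟨g', fl', by simpa using h1, h2, h3, h4⟩
      · by_cases hRC : pvHead op = "RC"
        · obtain ⟨i, hi, hge, hlt, hidx⟩ := pvIdx_extract op _ (hRCok hRC)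
          have hok' : pvOpsOK (if fl then (c : Int) else (r : Int))
              (if fl then (r : Int) else (c : Int)) rest := by
            have hTb : (pvHead op == "T") = false := by simp [hT]
            rw [hTb] at hrest
            simpa using hrest
          have hAcond : pvAStep (if fl then pvTrF c g else g) op
              = pvReverseCol (if fl then pvTrF c g else g) i := by
            simp only [pvAStep]
            rw [show PySem.List.pyGetD (pvTok op) 0 "" = pvHead op from rfl]
            rw [if_neg hT, if_neg hRR, if_pos hRC, hidx]
          cases fl with
          | false =>
            simp only [if_false] at hAcond hok' ⊢
            have hB : pvBStep (g, false) op = (pvRcS g i, false) := by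
              simp only [pvBStep]
              rw [show PySem.List.pyGetD (pvTok op) 0 "" = pvHead op from rfl]
              rw [if_neg hT, if_pos (Or.inr hRC), hidx]
              rw [if_neg (by simp [show (pvHead op == "RR") = false by simp [hRR]])]
              rw [pvSwapCol_eq]
            rw [hAcond, pvReverseCol_eq, hB]
            obtain ⟨g', fl', h1, h2, h3, h4⟩ := ih (pvRcS g i) false r c hr hc
              (by rw [pvLen_pvRcS, hlen]) (pvRect_pvRcS g c i hrect) hok'
            exact ⟨g', fl', by simpa using h1, h2, h3, h4⟩
          | true =>
            simp only [if_true] at hAcond hok' ⊢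
            simp only [if_true] at hge hlt
            have hB : pvBStep (g, true) op = (pvReverseRow g i, true) := by
              simp only [pvBStep]
              rw [show PySem.List.pyGetD (pvTok op) 0 "" = pvHead op from rfl]
              rw [if_neg hT, if_pos (Or.inr hRC), hidx]
              rw [if_pos (by simp [show (pvHead op == "RR") = false by simp [hRR]])]
              rfl
            have hnix := pvIdx?_in r i hge hlt
            have hAval : pvReverseCol (pvTrF c g) i = pvTrF c (pvReverseRow g i) := by
              rw [pvReverseCol_eq]
              have hrectT : pvRect (pvTrF c g) r := by
                have := pvRect_trF c g
                rwa [hlen] at this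
              rw [pvRcS_nat (pvTrF c g) r hrectT i hge hlt]
              rw [pvReverseRow_nat g i (by rw [hlen]; exact hge) (by rw [hlen]; exact hlt), hlen]
              exact pvCommute_rc g c hrect (pvNix r i) (by rw [hlen]; exact hnix.2)
            rw [hAcond, hAval, hB]
            obtain ⟨g', fl', h1, h2, h3, h4⟩ := ih (pvReverseRow g i) true r c hr hc
              (by rw [pvLen_pvReverseRow, hlen]) (pvRect_pvReverseRow g c i hrect) hok'
            exact ⟨g', fl', by simpa using h1, h2, h3, h4⟩
        · -- unrecognised operation: both sides keep their state
          have hok' : pvOpsOK (if fl then (c : Int) else (r : Int))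
              (if fl then (r : Int) else (c : Int)) rest := by
            have hTb : (pvHead op == "T") = false := by simp [hT]
            rw [hTb] at hrest
            simpa using hrest
          have hA : pvAStep (if fl then pvTrF c g else g) op = (if fl then pvTrF c g else g) := by
            simp only [pvAStep]
            rw [show PySem.List.pyGetD (pvTok op) 0 "" = pvHead op from rfl]
            rw [if_neg hT, if_neg hRR, if_neg hRC]
          have hB : pvBStep (g, fl) op = (g, fl) := by
            simp only [pvBStep]
            rw [show PySem.List.pyGetD (pvTok op) 0 "" = pvHead op from rfl]
            rw [if_neg hT, if_neg (by rintro (h | h) <;> [exact hRR h; exact hRC h])]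
          rw [hA, hB]
          exact ih g fl r c hr hc hlen hrect hok'

-- ===== VERDICT (by name: the statement is the Claim_ definition above) =====
theorem make_operations_spec : Claim_equal_make_operations := by
  unfold Claim_equal_make_operations
  intro matrix operations _ hpre
  unfold Spec_make_operations
  rw [pvA_eq_foldl, pvB_eq_foldl]
  unfold Pre_make_operations at hpre
  by_cases hT : operations.any (fun op => pvHead op == "T") = true
  · rw [if_pos hT] at hpre
    obtain ⟨hr, hc, hrect, hidx⟩ := hpre
    have hOK := pvPre_toOpsOK operations (matrix.length : Int) ((matrix.headD []).length : Int) hidx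
    obtain ⟨g', fl', hA, hB, hlen', hrect'⟩ := pvMain operations matrix false
      matrix.length (matrix.headD []).length hr hc rfl hrect (by simpa using hOK)
    simp only [Bool.false_eq_true, if_false] at hA
    rw [hA, hB]
    cases fl' with
    | false => simp
    | true =>
      simp only [if_true]
      rw [pvZipT_eq g' (matrix.headD []).length hrect'
        (by intro h; rw [h] at hlen'; simp at hlen'; omega)]
  · rw [if_neg hT] at hpre
    have hall : ∀ op ∈ operations, pvHead op ≠ "T" := by
      intro op hop h
      exact hT (List.any_eq_true.mpr ⟨op, hop, by simp [h]⟩)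
    obtain ⟨h1, h2⟩ := pvFlat operations matrix hall
    rw [h1, h2]
    simp
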